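-- pv_equiv track=rewrite | github.com/Akicou/nayhein-project | scale_up.py | _normalize_heads
-- ===== SOURCE A (Python) =====
-- from typing import Dict, List, Optional, Tuple, Any
--
-- def _normalize_heads(hidden_size: int, preferred_heads: int) -> Tuple[int, int]:
--     """Return (num_heads, head_dim) with hidden_size divisible by num_heads and even head_dim for RoPE."""
--     num_heads = max(1, min(preferred_heads, hidden_size))
--     while hidden_size % num_heads != 0 and num_heads > 1:
--         num_heads -= 1
--
--     head_dim = hidden_size // num_heads
--     if head_dim % 2 != 0:
--         # Prefer reducing heads so head_dim becomes even while preserving divisibility.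
--         found = False
--         for nh in range(num_heads - 1, 0, -1):
--             if hidden_size % nh == 0 and ((hidden_size // nh) % 2 == 0):
--                 num_heads = nh
--                 head_dim = hidden_size // nh
--                 found = True
--                 break
--         if not found:
--             # Fallback: bump hidden size minimally to make head_dim even
--             hidden_size += num_heads
--             head_dim = hidden_size // num_heads
--
--     return num_heads, head_dim
-- ===== SOURCE B (Python) =====
-- def _normalize_heads(hidden_size: int, preferred_heads: int):
--     """Return (num_heads, head_dim) with hidden_size divisible by num_heads and even head_dim for RoPE.
--
--     O(sqrt(hidden_size)): enumerate all divisors once, then select by max."""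
--     cap = max(1, min(preferred_heads, hidden_size))
--     divs = []
--     d = 1
--     while d * d <= hidden_size:
--         if hidden_size % d == 0:
--             divs.append(d)
--             divs.append(hidden_size // d)
--         d += 1
--     num_heads = max((x for x in divs if x <= cap), default=1)
--     head_dim = hidden_size // num_heads
--     if head_dim % 2 != 0:
--         best = max((x for x in divs if x < num_heads and (hidden_size // x) % 2 == 0), default=0)
--         if best != 0:
--             num_heads = best
--             head_dim = hidden_size // best
--         else:
--             head_dim = (hidden_size + num_heads) // num_heads
--     return num_heads, head_dim
-- ===== Notes on version B (the rewrite author's own statement) =====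
-- stated objective: faster
-- what changed: Replaces A's linear downward scans (decrement-until-divisor while loop and descending for loop) by a single O(sqrt(n)) divisor enumeration followed by max-selection with the respective constraints.
import Mathlib
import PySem

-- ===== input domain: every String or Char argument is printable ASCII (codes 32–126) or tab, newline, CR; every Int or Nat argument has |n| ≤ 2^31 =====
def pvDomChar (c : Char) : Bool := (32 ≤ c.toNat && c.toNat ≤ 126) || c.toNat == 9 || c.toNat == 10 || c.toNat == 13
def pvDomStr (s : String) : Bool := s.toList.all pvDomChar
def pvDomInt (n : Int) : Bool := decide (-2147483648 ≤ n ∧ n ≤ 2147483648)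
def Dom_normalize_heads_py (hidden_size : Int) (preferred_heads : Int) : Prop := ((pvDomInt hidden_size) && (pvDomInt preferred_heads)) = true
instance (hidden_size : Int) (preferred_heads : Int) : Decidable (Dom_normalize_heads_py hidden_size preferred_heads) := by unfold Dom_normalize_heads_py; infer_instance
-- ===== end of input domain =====

-- B replaces A's linear downward scans by one O(√n) divisor enumeration plus max-selection; same return value everywhere.

-- ===== PORT A =====
-- the 'while hidden_size % num_heads != 0 and num_heads > 1: num_heads -= 1' loop
def pvWhileA (hidden_size : Int) (num_heads : Int) : Int :=
  if PySem.Int.mod hidden_size num_heads ≠ 0 ∧ num_heads > 1 then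
    pvWhileA hidden_size (num_heads - 1)
  else num_heads
termination_by num_heads.toNat
decreasing_by
  rename_i h
  obtain ⟨-, h2⟩ := h
  omega

-- the 'for nh in range(num_heads - 1, 0, -1): … break' loop: first nh satisfying the condition
def pvForA (hidden_size : Int) : List Int → Option Int
  | [] => none
  | nh :: rest =>
    if PySem.Int.mod hidden_size nh = 0 ∧ PySem.Int.mod (PySem.Int.floordiv hidden_size nh) 2 = 0 then
      some nh
    else pvForA hidden_size rest

def normalize_heads_py (hidden_size : Int) (preferred_heads : Int) : Int × Int :=
  let num_heads := pvWhileA hidden_size (max 1 (min preferred_heads hidden_size))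
  let head_dim := PySem.Int.floordiv hidden_size num_heads
  if PySem.Int.mod head_dim 2 ≠ 0 then
    match pvForA hidden_size (PySem.List.pyRange (num_heads - 1) 0 (-1)) with
    | some nh => (nh, PySem.Int.floordiv hidden_size nh)
    | none => (num_heads, PySem.Int.floordiv (hidden_size + num_heads) num_heads)
  else (num_heads, head_dim)

-- ===== PORT B =====
-- 'while d * d <= hidden_size: … d += 1' collecting d and hidden_size // d for each divisor d
def pvDivsB (hidden_size : Int) (d : Int) (acc : List Int) : List Int :=
  if d * d ≤ hidden_size then
    pvDivsB hidden_size (d + 1)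
      (acc ++ (if PySem.Int.mod hidden_size d = 0 then [d, PySem.Int.floordiv hidden_size d] else []))
  else acc
termination_by (hidden_size + 1 - d).toNat
decreasing_by
  have h2 : d ≤ d * d := by nlinarith
  omega

def normalize_heads_py_alt (hidden_size : Int) (preferred_heads : Int) : Int × Int :=
  let cap := max 1 (min preferred_heads hidden_size)
  let divs := pvDivsB hidden_size 1 []
  let num_heads := PySem.List.maxD (divs.filter (fun x => decide (x ≤ cap))) (fun x => x) 1
  let head_dim := PySem.Int.floordiv hidden_size num_heads
  if PySem.Int.mod head_dim 2 ≠ 0 then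
    let best := PySem.List.maxD
      (divs.filter (fun x => decide (x < num_heads ∧ PySem.Int.mod (PySem.Int.floordiv hidden_size x) 2 = 0)))
      (fun x => x) 0
    if best ≠ 0 then (best, PySem.Int.floordiv hidden_size best)
    else (num_heads, PySem.Int.floordiv (hidden_size + num_heads) num_heads)
  else (num_heads, head_dim)

-- ===== PRECONDITION & SPEC =====
def Spec_normalize_heads_py (hidden_size : Int) (preferred_heads : Int) (out : Int × Int) : Prop := out = normalize_heads_py_alt hidden_size preferred_heads
instance (hidden_size : Int) (preferred_heads : Int) (out : Int × Int) : Decidable (Spec_normalize_heads_py hidden_size preferred_heads out) := by unfold Spec_normalize_heads_py; infer_instance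

-- ===== CLAIM (what is proved, stated in full; the proofs are below) =====
def Claim_equal_normalize_heads_py : Prop := ∀ (hidden_size : Int) (preferred_heads : Int), Dom_normalize_heads_py hidden_size preferred_heads → Spec_normalize_heads_py hidden_size preferred_heads (normalize_heads_py hidden_size preferred_heads)

-- ===== LEMMAS AND PROOFS =====

-- A's while loop returns the greatest divisor of hidden_size that is ≤ n (1 always qualifies).
theorem pvWhileA_spec (hidden n : Int) (hn : 1 ≤ n) :
    PySem.Int.mod hidden (pvWhileA hidden n) = 0 ∧ 1 ≤ pvWhileA hidden n ∧ pvWhileA hidden n ≤ n ∧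
      ∀ m, pvWhileA hidden n < m → m ≤ n → PySem.Int.mod hidden m ≠ 0 := by
  rw [pvWhileA.eq_def]
  split_ifs with h
  · obtain ⟨h1, h2⟩ := h
    obtain ⟨ih1, ih2, ih3, ih4⟩ := pvWhileA_spec hidden (n - 1) (by omega)
    refine ⟨ih1, ih2, by omega, fun m hm1 hm2 => ?_⟩
    by_cases hmn : m = n
    · subst hmn; exact h1
    · exact ih4 m hm1 (by omega)
  · rw [not_and_or, not_not] at h
    refine ⟨?_, hn, le_refl n, fun m hm1 hm2 => absurd (lt_of_lt_of_le hm1 hm2) (lt_irrefl n)⟩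
    rcases h with h | h
    · exact h
    · have : n = 1 := by omega
      subst this
      simp
termination_by n.toNat
decreasing_by omega

-- membership in the √-enumeration, generalized over the running counter d
theorem mem_pvDivsB (hidden d k : Int) (acc : List Int) (hd : 1 ≤ d) :
    k ∈ pvDivsB hidden d acc ↔ k ∈ acc ∨
      ∃ e, d ≤ e ∧ e * e ≤ hidden ∧ PySem.Int.mod hidden e = 0 ∧
        (k = e ∨ k = PySem.Int.floordiv hidden e) := by
  rw [pvDivsB]
  split_ifs with h1 h2
  · rw [mem_pvDivsB hidden (d + 1) k _ (by omega), List.mem_append]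
    constructor
    · rintro ((hk | hk) | ⟨e, he1, he2, he3, he4⟩)
      · exact Or.inl hk
      · exact Or.inr ⟨d, le_refl d, h1, h2, by simpa using hk⟩
      · exact Or.inr ⟨e, by omega, he2, he3, he4⟩
    · rintro (hk | ⟨e, he1, he2, he3, he4⟩)
      · exact Or.inl (Or.inl hk)
      · by_cases hed : e = d
        · subst hed; exact Or.inl (Or.inr (by simp [he4]))
        · exact Or.inr ⟨e, by omega, he2, he3, he4⟩
  · rw [mem_pvDivsB hidden (d + 1) k _ (by omega), List.append_nil]
    constructor
    · rintro (hk | ⟨e, he1, he2, he3, he4⟩)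
      · exact Or.inl hk
      · exact Or.inr ⟨e, by omega, he2, he3, he4⟩
    · rintro (hk | ⟨e, he1, he2, he3, he4⟩)
      · exact Or.inl hk
      · by_cases hed : e = d
        · subst hed; exact absurd he3 h2
        · exact Or.inr ⟨e, by omega, he2, he3, he4⟩
  · constructor
    · exact Or.inl
    · rintro (hk | ⟨e, he1, he2, -, -⟩)
      · exact hk
      · have : d * d ≤ e * e := by nlinarith
        omega
termination_by (hidden + 1 - d).toNat
decreasing_by
  all_goals
    have h2 : d ≤ d * d := by nlinarith
    omega

-- for positive hidden, the enumeration holds exactly the positive divisors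
theorem mem_divs (hidden k : Int) (hh : 0 < hidden) :
    k ∈ pvDivsB hidden 1 [] ↔ 1 ≤ k ∧ k ∣ hidden := by
  rw [mem_pvDivsB hidden 1 k [] le_rfl]
  simp only [List.not_mem_nil, false_or]
  constructor
  · rintro ⟨e, he1, he2, he3, (rfl | rfl)⟩
    · exact ⟨he1, (PySem.Int.mod_eq_zero_iff_dvd _ _).mp he3⟩
    · obtain ⟨c, rfl⟩ := (PySem.Int.mod_eq_zero_iff_dvd _ _).mp he3
      have hc : 0 < c := by nlinarith
      rw [PySem.Int.floordiv_eq_ediv_of_pos (by omega : (0:Int) < e),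
        Int.mul_ediv_cancel_left _ (by omega : e ≠ 0)]
      exact ⟨hc, dvd_mul_left c e⟩
  · rintro ⟨hk1, c, hc⟩
    have hcpos : 0 < c := by nlinarith
    by_cases hle : k ≤ c
    · exact ⟨k, hk1, by nlinarith, (PySem.Int.mod_eq_zero_iff_dvd _ _).mpr ⟨c, hc⟩, Or.inl rfl⟩
    · refine ⟨c, by omega, by nlinarith,
        (PySem.Int.mod_eq_zero_iff_dvd _ _).mpr ⟨k, by rw [hc, mul_comm]⟩, Or.inr ?_⟩
      rw [PySem.Int.floordiv_eq_ediv_of_pos hcpos, hc, Int.mul_ediv_cancel _ (by omega : c ≠ 0)]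

theorem maxD_id_nil (d : Int) : PySem.List.maxD ([] : List Int) (fun x => x) d = d := by
  simp [PySem.List.maxD, Option.getD,
    (PySem.List.max?_eq_none_iff (xs := ([] : List Int)) (key := fun x => x)).mpr rfl]

theorem maxD_id_mem_max (xs : List Int) (d : Int) (hne : xs ≠ []) :
    PySem.List.maxD xs (fun x => x) d ∈ xs ∧ ∀ y ∈ xs, y ≤ PySem.List.maxD xs (fun x => x) d := by
  cases xs with
  | nil => exact absurd rfl hne
  | cons x t =>
    rw [PySem.List.maxD, PySem.List.max?_id_cons, Option.getD_some]
    obtain ⟨h1, h2⟩ := PySem.List.le_foldl_max t x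
    refine ⟨?_, fun y hy => ?_⟩
    · rcases PySem.List.foldl_max_mem t x with h | h
      · rw [h]; exact List.mem_cons_self
      · exact List.mem_cons_of_mem x h
    · rcases List.mem_cons.mp hy with rfl | hy
      · exact h1
      · exact h2 y hy

-- A's for loop over range(t, 0, -1): none when nothing in [1, t] satisfies the condition …
theorem pvForA_none (hidden t : Int)
    (h : ∀ m, 1 ≤ m → m ≤ t →
      ¬(PySem.Int.mod hidden m = 0 ∧ PySem.Int.mod (PySem.Int.floordiv hidden m) 2 = 0)) :
    pvForA hidden (PySem.List.pyRange t 0 (-1)) = none := by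
  by_cases ht : t ≤ 0
  · rw [PySem.List.pyRange_neg_one_eq_nil ht]; rfl
  · rw [PySem.List.pyRange_neg_one_cons (by omega : (0:Int) < t)]
    rw [pvForA, if_neg (h t (by omega) le_rfl)]
    exact pvForA_none hidden (t - 1) (fun m hm1 hm2 => h m hm1 (by omega))
termination_by t.toNat
decreasing_by omega

-- … and the GREATEST qualifying element otherwise (the range descends, so first hit = greatest).
theorem pvForA_some (hidden t b : Int) (hb1 : 1 ≤ b) (hbt : b ≤ t)
    (hQ : PySem.Int.mod hidden b = 0 ∧ PySem.Int.mod (PySem.Int.floordiv hidden b) 2 = 0)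
    (hmax : ∀ m, b < m → m ≤ t →
      ¬(PySem.Int.mod hidden m = 0 ∧ PySem.Int.mod (PySem.Int.floordiv hidden m) 2 = 0)) :
    pvForA hidden (PySem.List.pyRange t 0 (-1)) = some b := by
  rw [PySem.List.pyRange_neg_one_cons (by omega : (0:Int) < t)]
  by_cases hbt' : b = t
  · subst hbt'; rw [pvForA, if_pos hQ]
  · rw [pvForA, if_neg (hmax t (by omega) le_rfl)]
    exact pvForA_some hidden (t - 1) b hb1 (by omega) hQ (fun m hm1 hm2 => hmax m hm1 (by omega))
termination_by t.toNat
decreasing_by omega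

theorem normalize_heads_eq (hidden pref : Int) :
    normalize_heads_py hidden pref = normalize_heads_py_alt hidden pref := by
  simp only [normalize_heads_py, normalize_heads_py_alt]
  by_cases hh : hidden ≤ 0
  · -- cap = 1, no divisors enumerated, num_heads = 1 on both sides
    have hcap : max 1 (min pref hidden) = 1 := by omega
    have hw : pvWhileA hidden 1 = 1 := by rw [pvWhileA.eq_def]; simp
    have hdv : pvDivsB hidden 1 [] = [] := by rw [pvDivsB.eq_def]; rw [if_neg (by omega)]
    rw [hcap, hw, hdv]
    simp only [List.filter_nil, maxD_id_nil]
    rw [show PySem.List.pyRange (1 - 1) 0 (-1) = [] from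
      PySem.List.pyRange_neg_one_eq_nil (by norm_num)]
    simp [pvForA]
  · rw [not_le] at hh
    set cap := max 1 (min pref hidden) with hcapdef
    have hcap1 : 1 ≤ cap := le_max_left 1 _
    have hcaph : cap ≤ hidden := by omega
    obtain ⟨hr0, hr1, hr2, hr3⟩ := pvWhileA_spec hidden cap hcap1
    set r := pvWhileA hidden cap with hrdef
    have hrdvd : r ∣ hidden := (PySem.Int.mod_eq_zero_iff_dvd _ _).mp hr0
    -- B's first max equals r
    have hfilt : ∀ x, x ∈ (pvDivsB hidden 1 []).filter (fun x => decide (x ≤ cap)) ↔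
        (1 ≤ x ∧ x ∣ hidden) ∧ x ≤ cap := by
      intro x; rw [List.mem_filter, mem_divs hidden x hh]; simp
    have hrmem : r ∈ (pvDivsB hidden 1 []).filter (fun x => decide (x ≤ cap)) :=
      (hfilt r).mpr ⟨⟨hr1, hrdvd⟩, hr2⟩
    obtain ⟨hm1, hm2⟩ := maxD_id_mem_max _ 1 (List.ne_nil_of_mem hrmem)
    have hnum : PySem.List.maxD ((pvDivsB hidden 1 []).filter (fun x => decide (x ≤ cap)))
        (fun x => x) 1 = r := by
      refine le_antisymm ?_ (hm2 r hrmem)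
      obtain ⟨⟨hx1, hx2⟩, hx3⟩ := (hfilt _).mp hm1
      by_contra hlt
      exact hr3 _ (by omega) hx3 ((PySem.Int.mod_eq_zero_iff_dvd _ _).mpr hx2)
    rw [hnum]
    set L := (pvDivsB hidden 1 []).filter
      (fun x => decide (x < r ∧ PySem.Int.mod (PySem.Int.floordiv hidden x) 2 = 0)) with hLdef
    have hLmem : ∀ x, x ∈ L ↔ (1 ≤ x ∧ x ∣ hidden) ∧ x < r ∧
        PySem.Int.mod (PySem.Int.floordiv hidden x) 2 = 0 := by
      intro x; rw [hLdef, List.mem_filter, mem_divs hidden x hh]; simp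
    set b := PySem.List.maxD L (fun x => x) 0 with hbdef
    split_ifs with hpar hbest
    · -- head_dim odd and B found a smaller divisor with even quotient: A's scan finds the same one
      have hL : L ≠ [] := by
        intro h; rw [h, maxD_id_nil] at hbdef; exact hbest hbdef
      obtain ⟨hb1, hb2⟩ := maxD_id_mem_max L 0 hL
      rw [← hbdef] at hb1 hb2
      obtain ⟨⟨hbge, hbdvd⟩, hblt, hbeven⟩ := (hLmem b).mp hb1
      have hsome : pvForA hidden (PySem.List.pyRange (r - 1) 0 (-1)) = some b := by
        refine pvForA_some hidden (r - 1) b hbge (by omega)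
          ⟨(PySem.Int.mod_eq_zero_iff_dvd _ _).mpr hbdvd, hbeven⟩
          (fun m hm1 hm2 hQ => ?_)
        have : m ∈ L := (hLmem m).mpr
          ⟨⟨by omega, (PySem.Int.mod_eq_zero_iff_dvd _ _).mp hQ.1⟩, by omega, hQ.2⟩
        exact absurd (hb2 m this) (by omega)
      rw [hsome]
    · -- head_dim odd and no qualifying divisor exists: both take the fallback
      have hL : L = [] := by
        rcases eq_or_ne L [] with h | h
        · exact h
        · obtain ⟨hb1, -⟩ := maxD_id_mem_max L 0 h
          rw [← hbdef] at hb1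
          obtain ⟨⟨hbge, -⟩, -, -⟩ := (hLmem b).mp hb1
          omega
      have hnone : pvForA hidden (PySem.List.pyRange (r - 1) 0 (-1)) = none := by
        refine pvForA_none hidden (r - 1) (fun m hm1 hm2 hQ => ?_)
        have : m ∈ L := (hLmem m).mpr
          ⟨⟨hm1, (PySem.Int.mod_eq_zero_iff_dvd _ _).mp hQ.1⟩, by omega, hQ.2⟩
        rw [hL] at this; exact List.not_mem_nil this
      rw [hnone]
    · rfl

-- ===== VERDICT (by name: the statement is the Claim_ definition above) =====
theorem normalize_heads_py_spec : Claim_equal_normalize_heads_py := by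
  intro hidden_size preferred_heads _
  unfold Spec_normalize_heads_py
  exact normalize_heads_eq hidden_size preferred_heads
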